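-- pv_equiv track=rewrite | github.com/csoneira/MINGO_PIPELINE | MASTER/ANCILLARY/PLOTTERS/specific_metadata_plotter.py | normalize_station_ids
-- ===== SOURCE A (Python) =====
-- from typing import Dict, Iterable, List, Optional, Sequence, Tuple, TypeVar
--
-- STATIONS: Tuple[str, ...] = ("1", "2", "3", "4")
--
-- def normalize_station_ids(requested: Optional[List[str]]) -> List[str]:
--     if not requested:
--         return list(STATIONS)
--     normalized = []
--     for station in requested:
--         station_id = station.strip()
--         if station_id in STATIONS:
--             normalized.append(station_id)
--         elif station_id.startswith("0") and station_id[1:] in STATIONS: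
--             normalized.append(station_id[1:])
--         else:
--             raise ValueError(f"Unsupported station identifier: {station}")
--     return sorted(set(normalized), key=lambda s: STATIONS.index(s))
-- ===== SOURCE B (Python) =====
-- from typing import List, Optional, Tuple
--
-- STATIONS: Tuple[str, ...] = ("1", "2", "3", "4")
--
-- # lookup table: every accepted token (canonical or zero-prefixed) -> station index
-- _STATION_INDEX = {"1": 0, "01": 0, "2": 1, "02": 1, "3": 2, "03": 2, "4": 3, "04": 3}
--
-- def normalize_station_ids(requested: Optional[List[str]]) -> List[str]:
--     if not requested:
--         return list(STATIONS)
--     mask = 0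
--     for station in requested:
--         i = _STATION_INDEX.get(station.strip())
--         if i is None:
--             raise ValueError(f"Unsupported station identifier: {station}")
--         mask |= 1 << i
--     return [s for i, s in enumerate(STATIONS) if mask >> i & 1]
-- ===== Notes on version B (the rewrite author's own statement) =====
-- stated objective: alternative
-- what changed: B replaces A's two-branch membership test and list-accumulate-then-sorted(set, key=STATIONS.index) pipeline with a precomputed token->index lookup table and an integer bitmask accumulator, emitting the result by testing the bit of each canonical station.
import Mathlib
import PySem

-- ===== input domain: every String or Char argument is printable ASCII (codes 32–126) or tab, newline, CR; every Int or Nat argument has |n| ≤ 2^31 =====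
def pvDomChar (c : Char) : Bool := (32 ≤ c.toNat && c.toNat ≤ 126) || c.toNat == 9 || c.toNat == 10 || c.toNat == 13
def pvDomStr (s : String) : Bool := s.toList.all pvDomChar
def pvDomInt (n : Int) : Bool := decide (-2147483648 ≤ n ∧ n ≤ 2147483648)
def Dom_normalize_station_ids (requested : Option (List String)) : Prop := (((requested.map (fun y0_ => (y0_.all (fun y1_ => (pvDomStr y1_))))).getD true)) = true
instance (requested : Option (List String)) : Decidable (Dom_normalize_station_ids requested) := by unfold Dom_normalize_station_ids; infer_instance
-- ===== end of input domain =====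

-- B replaces A's two-branch membership test and list + sorted(set, key=STATIONS.index) pipeline by a
-- precomputed token->index lookup table and an integer bitmask accumulator, reading the result off the
-- bits of the mask; same return value on every input on which A returns (Pre_ excludes A's ValueError).

-- ===== PORT A =====
def pvStationsA : List String := ["1", "2", "3", "4"]

def pvNormA : List String -> List String -> Option (List String)
  | [], normalized => some normalized
  | station :: rest, normalized =>
    let station_id := PySem.Str.strip station
    if pvStationsA.contains station_id then
      pvNormA rest (normalized ++ [station_id])
    else if PySem.Str.startswith station_id "0"
            && pvStationsA.contains (PySem.Str.slice station_id (some 1) none) then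
      pvNormA rest (normalized ++ [PySem.Str.slice station_id (some 1) none])
    else none  -- raise ValueError

def normalize_station_ids (requested : Option (List String)) : List String :=
  match requested with
  | none => pvStationsA
  | some [] => pvStationsA
  | some l =>
    match pvNormA l [] with
    | none => []  -- unreachable under Pre_ (ValueError)
    | some normalized =>
      PySem.List.sorted (PySem.Set.ofList normalized)
        (fun s => (PySem.List.index? pvStationsA s).getD 0) false

-- ===== PORT B =====
def pvStationsB : List String := ["1", "2", "3", "4"]

-- the literal dict _STATION_INDEX of Source B
def pvStationIndex : PySem.Dict String Nat :=
  PySem.Dict.ofList [("1", 0), ("01", 0), ("2", 1), ("02", 1), ("3", 2), ("03", 2), ("4", 3), ("04", 3)]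

-- the validation loop of Source B: OR each found index into the bitmask; none = ValueError
def pvMaskLoop : List String -> Nat -> Option Nat
  | [], mask => some mask
  | station :: rest, mask =>
    match PySem.Dict.get? pvStationIndex (PySem.Str.strip station) with
    | none => none  -- raise ValueError
    | some i => pvMaskLoop rest (mask ||| (1 <<< i))

def normalize_station_ids_alt (requested : Option (List String)) : List String :=
  let l := requested.getD []          -- 'if not requested' : None and [] both fall through
  if l.isEmpty then pvStationsB
  else
    match pvMaskLoop l 0 with
    | none => []  -- unreachable under Pre_ (ValueError)
    | some mask =>
      ((PySem.List.enumerate pvStationsB).filter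
        (fun p => (mask >>> p.1.toNat) &&& 1 != 0)).map (fun p => p.2)

-- ===== PRECONDITION & SPEC =====
-- Pre_ excludes exactly the inputs on which A raises ValueError: some element neither strips
-- to one of "1".."4" nor is "0" followed by one of them.
def Pre_normalize_station_ids (requested : Option (List String)) : Prop :=
  match requested with
  | none => True
  | some l => forall s, s ∈ l ->
      ((["1", "2", "3", "4"] : List String).contains (PySem.Str.strip s) = true ∨
       (PySem.Str.startswith (PySem.Str.strip s) "0" = true ∧
        (["1", "2", "3", "4"] : List String).contains
          (PySem.Str.slice (PySem.Str.strip s) (some 1) none) = true))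

instance (requested : Option (List String)) : Decidable (Pre_normalize_station_ids requested) := by
  unfold Pre_normalize_station_ids; cases requested <;> infer_instance

def pvWitness_normalize_station_ids : Option (List String) := some ["1", " 02 ", "4", "2"]

def Spec_normalize_station_ids (requested : Option (List String)) (out : List String) : Prop := out = normalize_station_ids_alt requested
instance (requested : Option (List String)) (out : List String) : Decidable (Spec_normalize_station_ids requested out) := by unfold Spec_normalize_station_ids; infer_instance

-- ===== CLAIM (what is proved, stated in full; the proofs are below) =====
def Claim_equal_normalize_station_ids : Prop := ∀ (requested : Option (List String)), Dom_normalize_station_ids requested → Pre_normalize_station_ids requested → Spec_normalize_station_ids requested (normalize_station_ids requested)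

-- ===== LEMMAS AND PROOFS =====

-- the shorthand for the per-element half of Pre_
def pvOk (s : String) : Prop :=
  (["1", "2", "3", "4"] : List String).contains (PySem.Str.strip s) = true ∨
  (PySem.Str.startswith (PySem.Str.strip s) "0" = true ∧
   (["1", "2", "3", "4"] : List String).contains
     (PySem.Str.slice (PySem.Str.strip s) (some 1) none) = true)

-- the normalized ID an accepted input string contributes (A's accepted value)
def pvNid (s : String) : String :=
  let sid := PySem.Str.strip s
  if pvStationsA.contains sid then sid else PySem.Str.slice sid (some 1) none

theorem pvNid_eq (s : String) : pvNid s =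
    if pvStationsA.contains (PySem.Str.strip s) then PySem.Str.strip s
    else PySem.Str.slice (PySem.Str.strip s) (some 1) none := rfl

-- under pvOk, the stripped string is one of the eight accepted literal tokens
theorem pvStrip_cases (s : String) (h : pvOk s) :
    PySem.Str.strip s ∈ (["1", "2", "3", "4", "01", "02", "03", "04"] : List String) := by
  rcases h with hc | ⟨h0, hc⟩
  · have hm := List.contains_iff_mem.mp hc
    simp only [List.mem_cons, List.not_mem_nil, or_false] at hm ⊢
    rcases hm with h1 | h1 | h1 | h1
    exacts [Or.inl h1, Or.inr (Or.inl h1), Or.inr (Or.inr (Or.inl h1)),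
      Or.inr (Or.inr (Or.inr (Or.inl h1)))]
  · have hm := List.contains_iff_mem.mp hc
    have hzero : ("0" : String).toList = ['0'] := by decide
    rw [PySem.Str.startswith_eq] at h0
    obtain ⟨rest, hrest⟩ := (PySem.Chars.startswith_iff _ _).mp h0
    rw [hzero] at hrest
    have hlist : (PySem.Str.strip s).toList = '0' :: rest := by rw [← hrest]; rfl
    have htail : (PySem.Str.slice (PySem.Str.strip s) (some 1) none).toList = rest := by
      rw [PySem.Str.toList_slice, PySem.Chars.slice_eq_listSlice, PySem.List.slice_from_one, hlist, List.tail_cons]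
    simp only [List.mem_cons, List.not_mem_nil, or_false] at hm ⊢
    rcases hm with h1 | h1 | h1 | h1
    · refine Or.inr (Or.inr (Or.inr (Or.inr (Or.inl ?_))))
      apply String.toList_inj.mp
      rw [hlist, ← htail, h1]; decide
    · refine Or.inr (Or.inr (Or.inr (Or.inr (Or.inr (Or.inl ?_)))))
      apply String.toList_inj.mp
      rw [hlist, ← htail, h1]; decide
    · refine Or.inr (Or.inr (Or.inr (Or.inr (Or.inr (Or.inr (Or.inl ?_))))))
      apply String.toList_inj.mp
      rw [hlist, ← htail, h1]; decide
    · refine Or.inr (Or.inr (Or.inr (Or.inr (Or.inr (Or.inr (Or.inr ?_))))))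
      apply String.toList_inj.mp
      rw [hlist, ← htail, h1]; decide

def pvIdxOf (t : String) : Nat := (PySem.List.index? pvStationsA t).getD 0

-- the dict lookup of B agrees with A's two-branch normalization on every accepted string
theorem pvLookup (s : String) (h : pvOk s) :
    PySem.Dict.get? pvStationIndex (PySem.Str.strip s) = some (pvIdxOf (pvNid s)) ∧
    pvNid s ∈ pvStationsA := by
  have hc := pvStrip_cases s h
  simp only [List.mem_cons, List.not_mem_nil, or_false] at hc
  rcases hc with h1 | h1 | h1 | h1 | h1 | h1 | h1 | h1 <;>
    · rw [pvNid_eq, h1]; exact ⟨by decide, by decide⟩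

-- A's loop appends pvNid of each element
theorem pvNormA_eq (l : List String) (acc : List String) (h : ∀ s ∈ l, pvOk s) :
    pvNormA l acc = some (acc ++ l.map pvNid) := by
  induction l generalizing acc with
  | nil => simp [pvNormA]
  | cons x xs ih =>
    have hx := h x (by simp)
    have hxs : ∀ s ∈ xs, pvOk s := fun s hs => h s (List.mem_cons_of_mem _ hs)
    simp only [pvNormA, List.map_cons]
    by_cases hc1 : pvStationsA.contains (PySem.Str.strip x) = true
    · rw [if_pos hc1, ih _ hxs, pvNid_eq, if_pos hc1]
      simp
    · rw [if_neg hc1]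
      have hcond : (PySem.Str.startswith (PySem.Str.strip x) "0"
          && pvStationsA.contains (PySem.Str.slice (PySem.Str.strip x) (some 1) none)) = true := by
        rcases hx with hc | ⟨h0, hc⟩
        · exact absurd hc hc1
        · simp only [Bool.and_eq_true]; exact ⟨h0, hc⟩
      rw [if_pos hcond, ih _ hxs, pvNid_eq, if_neg hc1]
      simp

-- B's loop ORs in the bit of pvNid of each element
theorem pvMaskLoop_eq (l : List String) (mask : Nat) (h : ∀ s ∈ l, pvOk s) :
    pvMaskLoop l mask = some (l.foldl (fun m s => m ||| (1 <<< pvIdxOf (pvNid s))) mask) := by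
  induction l generalizing mask with
  | nil => simp [pvMaskLoop]
  | cons x xs ih =>
    have hx := (pvLookup x (h x (by simp))).1
    have hxs : ∀ s ∈ xs, pvOk s := fun s hs => h s (List.mem_cons_of_mem _ hs)
    simp only [pvMaskLoop, hx, List.foldl_cons]
    exact ih _ hxs

-- which bits the accumulated mask carries
theorem pvMask_testBit (l : List String) (mask : Nat) (i : Nat) :
    (l.foldl (fun m s => m ||| (1 <<< pvIdxOf (pvNid s))) mask).testBit i
      = (mask.testBit i || l.any (fun s => pvIdxOf (pvNid s) == i)) := by
  induction l generalizing mask with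
  | nil => simp
  | cons x xs ih =>
    simp only [List.foldl_cons, List.any_cons, ih, Nat.testBit_or]
    rw [Nat.shiftLeft_eq, one_mul, Nat.testBit_two_pow]
    by_cases hq : pvIdxOf (pvNid x) = i <;> simp [hq, Bool.or_comm, Bool.or_left_comm]

-- the bit test in B's comprehension is Nat.testBit
theorem pvBit_eq (n i : Nat) : ((n >>> i) &&& 1 != 0) = n.testBit i := by
  unfold Nat.testBit
  rw [Nat.and_comm]

-- filtering the canonical list by an arbitrary predicate is strictly increasing in index?-key
theorem pv_filter_pairwise (p : String → Bool) :
    (pvStationsA.filter p).Pairwise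
      (fun a b => (PySem.List.index? pvStationsA a).getD 0 < (PySem.List.index? pvStationsA b).getD 0) := by
  cases h1 : p "1" <;> cases h2 : p "2" <;> cases h3 : p "3" <;> cases h4 : p "4" <;>
    simp_all [pvStationsA, List.filter] <;> decide

theorem pvStationsA_nodup : pvStationsA.Nodup := by decide

-- the sorted(set(m), key=index) of A equals the canonical filter by membership
theorem pv_sorted_eq_filter (m : List String) (hm : ∀ x ∈ m, x ∈ pvStationsA) :
    PySem.List.sorted (PySem.Set.ofList m)
        (fun s => (PySem.List.index? pvStationsA s).getD 0) false
      = pvStationsA.filter (fun s => decide (s ∈ m)) := by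
  apply PySem.List.sorted_eq_of_perm_of_pairwise_lt
  · rw [List.perm_ext_iff_of_nodup
      (List.Nodup.filter _ pvStationsA_nodup) (PySem.Set.nodup_ofList m)]
    intro a
    simp only [List.mem_filter, PySem.Set.mem_ofList, decide_eq_true_eq]
    exact ⟨fun h => h.2, fun h => ⟨hm a h, h⟩⟩
  · exact pv_filter_pairwise _

-- for accepted elements, membership in the normalized list is the bit of the mask
theorem pvBit_iff_mem (l : List String) (h : ∀ s ∈ l, pvOk s) (t : String)
    (ht : t ∈ pvStationsA) :
    (l.foldl (fun m s => m ||| (1 <<< pvIdxOf (pvNid s))) 0).testBit (pvIdxOf t)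
      = decide (t ∈ l.map pvNid) := by
  rw [pvMask_testBit]
  simp only [Nat.zero_testBit, Bool.false_or]
  rcases Bool.eq_false_or_eq_true (l.any (fun s => pvIdxOf (pvNid s) == pvIdxOf t)) with hb | hb <;>
    rw [hb]
  case inr =>
    have : ¬ t ∈ l.map pvNid := by
      intro hmem
      rcases List.mem_map.mp hmem with ⟨s, hs, hrfl⟩
      have := List.any_eq_false.mp hb s hs
      simp [hrfl] at this
    simp [this]
  case inl =>
    rcases List.any_eq_true.mp hb with ⟨s, hs, heq⟩
    have hsn := (pvLookup s (h s hs)).2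
    have hidx : pvIdxOf (pvNid s) = pvIdxOf t := by simpa using heq
    simp only [pvStationsA, List.mem_cons, List.not_mem_nil, or_false] at hsn ht
    have hst : pvNid s = t := by
      rcases hsn with h1 | h1 | h1 | h1 <;> rcases ht with h2 | h2 | h2 | h2 <;>
        rw [h1, h2] at hidx ⊢ <;> first | rfl | exact absurd hidx (by decide)
    have : t ∈ l.map pvNid := hst ▸ List.mem_map_of_mem hs
    simp [this]

-- ===== VERDICT (by name: the statement is the Claim_ definition above) =====
theorem normalize_station_ids_spec : Claim_equal_normalize_station_ids := by
  intro requested _hdom hpre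
  unfold Spec_normalize_station_ids
  match requested with
  | none => rfl
  | some [] => rfl
  | some (x :: xs) =>
    have h : ∀ s ∈ (x :: xs), pvOk s := fun s hs => hpre s hs
    have hA := pvNormA_eq (x :: xs) [] h
    have hB := pvMaskLoop_eq (x :: xs) 0 h
    simp only [normalize_station_ids, normalize_station_ids_alt, Option.getD_some,
      List.isEmpty_cons, Bool.false_eq_true, if_false, hA, hB, List.nil_append]
    set M := (x :: xs).map pvNid with hM
    set mask := ((x :: xs).foldl (fun m s => m ||| (1 <<< pvIdxOf (pvNid s))) 0) with hmask
    have hmem : ∀ y ∈ M, y ∈ pvStationsA := by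
      intro y hy
      rcases List.mem_map.mp hy with ⟨s, hs, rfl⟩
      exact (pvLookup s (h s hs)).2
    rw [pv_sorted_eq_filter M hmem]
    have hbit : ∀ t ∈ pvStationsA, mask.testBit (pvIdxOf t) = decide (t ∈ M) :=
      fun t ht => pvBit_iff_mem (x :: xs) h t ht
    have e1 : mask.testBit ((0 : Int).toNat) = decide (("1" : String) ∈ M) := by
      have hi : pvIdxOf "1" = (0 : Int).toNat := by decide
      rw [← hi]; exact hbit "1" (by decide)
    have e2 : mask.testBit ((1 : Int).toNat) = decide (("2" : String) ∈ M) := by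
      have hi : pvIdxOf "2" = (1 : Int).toNat := by decide
      rw [← hi]; exact hbit "2" (by decide)
    have e3 : mask.testBit ((2 : Int).toNat) = decide (("3" : String) ∈ M) := by
      have hi : pvIdxOf "3" = (2 : Int).toNat := by decide
      rw [← hi]; exact hbit "3" (by decide)
    have e4 : mask.testBit ((3 : Int).toNat) = decide (("4" : String) ∈ M) := by
      have hi : pvIdxOf "4" = (3 : Int).toNat := by decide
      rw [← hi]; exact hbit "4" (by decide)
    have he : PySem.List.enumerate pvStationsB = [((0 : Int), "1"), (1, "2"), (2, "3"), (3, "4")] := by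
      decide
    rw [he]
    simp only [List.filter_cons, List.filter_nil, pvBit_eq, e1, e2, e3, e4]
    cases hd1 : decide (("1" : String) ∈ M) <;> cases hd2 : decide (("2" : String) ∈ M) <;>
      cases hd3 : decide (("3" : String) ∈ M) <;> cases hd4 : decide (("4" : String) ∈ M) <;>
      simp [pvStationsA, hd1, hd2, hd3, hd4]
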